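-- pv_equiv track=rewrite | github.com/SoerenWilkening/quantum-programming-package | src/chess_encoding.py | legal_moves_black
-- ===== SOURCE A (Python) =====
-- _KNIGHT_OFFSETS = [
--     (-2, -1),
--     (-2, 1),
--     (-1, -2),
--     (-1, 2),
--     (1, -2),
--     (1, 2),
--     (2, -1),
--     (2, 1),
-- ]
--
-- _KING_OFFSETS = [
--     (-1, -1),
--     (-1, 0),
--     (-1, 1),
--     (0, -1),
--     (0, 1),
--     (1, -1),
--     (1, 0),
--     (1, 1),
-- ]
--
-- def knight_attacks(square):
--     """Return sorted list of squares attacked by a knight on ``square``.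
--
--     Parameters
--     ----------
--     square : int
--         Square index 0-63 (rank * 8 + file).
--
--     Returns
--     -------
--     list[int]
--         Attacked square indices, sorted ascending.
--     """
--     rank, file = divmod(square, 8)
--     attacks = []
--     for dr, df in _KNIGHT_OFFSETS:
--         nr, nf = rank + dr, file + df
--         if 0 <= nr < 8 and 0 <= nf < 8:
--             attacks.append(nr * 8 + nf)
--     return sorted(attacks)
--
-- def king_attacks(square):
--     """Return sorted list of squares attacked by a king on ``square``.
--
--     Parameters
--     ----------
--     square : int
--         Square index 0-63 (rank * 8 + file).
--
--     Returns
--     -------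
--     list[int]
--         Attacked square indices, sorted ascending.
--     """
--     rank, file = divmod(square, 8)
--     attacks = []
--     for dr, df in _KING_OFFSETS:
--         nr, nf = rank + dr, file + df
--         if 0 <= nr < 8 and 0 <= nf < 8:
--             attacks.append(nr * 8 + nf)
--     return sorted(attacks)
--
-- def legal_moves_black(wk_sq, bk_sq, wn_squares):
--     """Return enumerated legal moves for black.
--
--     In the simplified KNK endgame, black only has a king.
--     Filters out squares attacked by any white piece.
--
--     Parameters
--     ----------
--     wk_sq : int
--         White king square (0-63).
--     bk_sq : int
--         Black king square (0-63).
--     wn_squares : list[int]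
--         White knight square(s).
--
--     Returns
--     -------
--     list[tuple[int, int]]
--         Sorted list of (bk_sq, destination_square) pairs.
--         Index in list = branch register value.
--     """
--     # Compute white attack set: all squares attacked by white pieces
--     white_attack_set = set(king_attacks(wk_sq)) | {wk_sq}
--     for sq in wn_squares:
--         white_attack_set |= set(knight_attacks(sq))
--
--     # Black king moves, excluding attacked squares
--     moves = []
--     for dest in king_attacks(bk_sq):
--         if dest not in white_attack_set:
--             moves.append((bk_sq, dest))
--
--     moves.sort()
--     return moves
-- ===== SOURCE B (Python) =====
-- # B: no white_attack_set is built; each candidate destination is tested for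
-- # attackedness by pure delta arithmetic against each white piece, and the
-- # destinations are generated already in ascending order so no sort is needed.
--
-- _KNIGHT_OFFSETS = [
--     (-2, -1), (-2, 1), (-1, -2), (-1, 2),
--     (1, -2), (1, 2), (2, -1), (2, 1),
-- ]
--
-- _KING_OFFSETS = [
--     (-1, -1), (-1, 0), (-1, 1), (0, -1),
--     (0, 1), (1, -1), (1, 0), (1, 1),
-- ]
--
--
-- def _attacked(dest, wk_sq, wn_squares):
--     """Is on-board square ``dest`` attacked (or occupied) by white?"""
--     if dest == wk_sq:
--         return True
--     if (dest // 8 - wk_sq // 8, dest % 8 - wk_sq % 8) in _KING_OFFSETS: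
--         return True
--     for sq in wn_squares:
--         if (dest // 8 - sq // 8, dest % 8 - sq % 8) in _KNIGHT_OFFSETS:
--             return True
--     return False
--
--
-- def legal_moves_black(wk_sq, bk_sq, wn_squares):
--     rank, file = divmod(bk_sq, 8)
--     return [(bk_sq, (rank + dr) * 8 + (file + df))
--             for dr, df in _KING_OFFSETS
--             if 0 <= rank + dr < 8 and 0 <= file + df < 8
--             and not _attacked((rank + dr) * 8 + (file + df), wk_sq, wn_squares)]
-- ===== Notes on version B (the rewrite author's own statement) =====
-- stated objective: faster
-- what changed: Instead of precomputing the union set of all white-attacked squares (generating and sorting an attack list per white piece) and filtering the sorted king-move list, then sorting the pairs again, B generates the black king's destinations directly in ascending order and tests each one for attackedness by O(1) coordinate-delta arithmetic against the white king and each knight with early exit, with no attack set and no sort.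
import Mathlib
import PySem

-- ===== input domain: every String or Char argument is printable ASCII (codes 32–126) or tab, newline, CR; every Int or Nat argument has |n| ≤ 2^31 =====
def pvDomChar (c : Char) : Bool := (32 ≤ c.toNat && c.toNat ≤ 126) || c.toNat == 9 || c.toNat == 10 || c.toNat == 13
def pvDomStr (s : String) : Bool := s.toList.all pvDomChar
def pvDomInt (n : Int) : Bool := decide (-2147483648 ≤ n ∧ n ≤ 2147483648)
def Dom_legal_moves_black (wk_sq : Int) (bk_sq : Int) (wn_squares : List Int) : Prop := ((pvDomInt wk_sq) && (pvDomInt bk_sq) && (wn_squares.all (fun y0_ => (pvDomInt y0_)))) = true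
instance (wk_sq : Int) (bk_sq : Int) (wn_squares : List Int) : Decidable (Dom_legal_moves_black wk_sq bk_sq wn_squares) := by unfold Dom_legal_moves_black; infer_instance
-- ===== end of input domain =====

-- B replaces A's precomputed white-attack set (union of generated attack lists) and its two
-- sorts by generating the king's destinations in ascending order and testing each with O(1)
-- coordinate-delta arithmetic per white piece; objective: faster (no attack-set build, measured faster in a timing run).

-- ===== PORT A =====
def pvKnightOffsets : List (Int × Int) :=
  [(-2, -1), (-2, 1), (-1, -2), (-1, 2), (1, -2), (1, 2), (2, -1), (2, 1)]

def pvKingOffsets : List (Int × Int) :=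
  [(-1, -1), (-1, 0), (-1, 1), (0, -1), (0, 1), (1, -1), (1, 0), (1, 1)]

def knight_attacks (square : Int) : List Int :=
  let rank := PySem.Int.floordiv square 8
  let file := PySem.Int.mod square 8
  let attacks := pvKnightOffsets.foldl (fun acc d =>
    if 0 ≤ rank + d.1 ∧ rank + d.1 < 8 ∧ 0 ≤ file + d.2 ∧ file + d.2 < 8 then
      acc ++ [(rank + d.1) * 8 + (file + d.2)]
    else acc) []
  PySem.List.sorted attacks (fun x => x) false

def king_attacks (square : Int) : List Int :=
  let rank := PySem.Int.floordiv square 8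
  let file := PySem.Int.mod square 8
  let attacks := pvKingOffsets.foldl (fun acc d =>
    if 0 ≤ rank + d.1 ∧ rank + d.1 < 8 ∧ 0 ≤ file + d.2 ∧ file + d.2 < 8 then
      acc ++ [(rank + d.1) * 8 + (file + d.2)]
    else acc) []
  PySem.List.sorted attacks (fun x => x) false

def legal_moves_black (wk_sq : Int) (bk_sq : Int) (wn_squares : List Int) : List (Int × Int) :=
  let white_attack_set : PySem.Set Int :=
    wn_squares.foldl (fun s sq => PySem.Set.union s (PySem.Set.ofList (knight_attacks sq)))
      (PySem.Set.union (PySem.Set.ofList (king_attacks wk_sq)) [wk_sq])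
  let moves := (king_attacks bk_sq).foldl (fun acc dest =>
    if ¬ (PySem.Set.contains white_attack_set dest = true) then acc ++ [(bk_sq, dest)]
    else acc) []
  PySem.List.sorted2 moves (fun m => m.1) (fun m => m.2) false

-- ===== PORT B =====
def pvAttacked (dest : Int) (wk_sq : Int) (wn_squares : List Int) : Bool :=
  if dest == wk_sq then true
  else if pvKingOffsets.contains
      (PySem.Int.floordiv dest 8 - PySem.Int.floordiv wk_sq 8,
       PySem.Int.mod dest 8 - PySem.Int.mod wk_sq 8) then true
  else wn_squares.any (fun sq => pvKnightOffsets.contains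
      (PySem.Int.floordiv dest 8 - PySem.Int.floordiv sq 8,
       PySem.Int.mod dest 8 - PySem.Int.mod sq 8))

def legal_moves_black_alt (wk_sq : Int) (bk_sq : Int) (wn_squares : List Int) : List (Int × Int) :=
  let rank := PySem.Int.floordiv bk_sq 8
  let file := PySem.Int.mod bk_sq 8
  pvKingOffsets.foldl (fun acc d =>
    if 0 ≤ rank + d.1 ∧ rank + d.1 < 8 ∧ 0 ≤ file + d.2 ∧ file + d.2 < 8 ∧
        ¬ (pvAttacked ((rank + d.1) * 8 + (file + d.2)) wk_sq wn_squares = true) then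
      acc ++ [(bk_sq, (rank + d.1) * 8 + (file + d.2))]
    else acc) []

-- ===== PRECONDITION & SPEC =====
def Spec_legal_moves_black (wk_sq : Int) (bk_sq : Int) (wn_squares : List Int) (out : List (Int × Int)) : Prop := out = legal_moves_black_alt wk_sq bk_sq wn_squares
instance (wk_sq : Int) (bk_sq : Int) (wn_squares : List Int) (out : List (Int × Int)) : Decidable (Spec_legal_moves_black wk_sq bk_sq wn_squares out) := by unfold Spec_legal_moves_black; infer_instance

-- ===== CLAIM (what is proved, stated in full; the proofs are below) =====
def Claim_equal_legal_moves_black : Prop := ∀ (wk_sq : Int) (bk_sq : Int) (wn_squares : List Int), Dom_legal_moves_black wk_sq bk_sq wn_squares → Spec_legal_moves_black wk_sq bk_sq wn_squares (legal_moves_black wk_sq bk_sq wn_squares)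

-- ===== LEMMAS AND PROOFS =====

-- the raw (unsorted) attack-square list generated by A's offset loop, in filter/map form
def pvGen (offs : List (Int × Int)) (square : Int) : List Int :=
  (offs.filter (fun d =>
      decide (0 ≤ PySem.Int.floordiv square 8 + d.1 ∧ PySem.Int.floordiv square 8 + d.1 < 8 ∧
              0 ≤ PySem.Int.mod square 8 + d.2 ∧ PySem.Int.mod square 8 + d.2 < 8))).map
    (fun d => (PySem.Int.floordiv square 8 + d.1) * 8 + (PySem.Int.mod square 8 + d.2))

theorem pvGen_foldl (offs : List (Int × Int)) (square : Int) :
    offs.foldl (fun acc d =>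
      if 0 ≤ PySem.Int.floordiv square 8 + d.1 ∧ PySem.Int.floordiv square 8 + d.1 < 8 ∧
          0 ≤ PySem.Int.mod square 8 + d.2 ∧ PySem.Int.mod square 8 + d.2 < 8 then
        acc ++ [(PySem.Int.floordiv square 8 + d.1) * 8 + (PySem.Int.mod square 8 + d.2)]
      else acc) [] = pvGen offs square := by
  rw [PySem.List.foldl_append_ite]; rfl

theorem pvGen_pairwise_king (square : Int) : (pvGen pvKingOffsets square).Pairwise (· < ·) := by
  have hf₀ := PySem.Int.mod_nonneg square (b := 8) (by norm_num)
  have hf₁ := PySem.Int.mod_lt square (b := 8) (by norm_num)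
  have h : pvKingOffsets.Pairwise (fun d e =>
      (0 ≤ PySem.Int.mod square 8 + d.2 ∧ PySem.Int.mod square 8 + d.2 < 8) →
      (0 ≤ PySem.Int.mod square 8 + e.2 ∧ PySem.Int.mod square 8 + e.2 < 8) →
      (PySem.Int.floordiv square 8 + d.1) * 8 + (PySem.Int.mod square 8 + d.2) <
      (PySem.Int.floordiv square 8 + e.1) * 8 + (PySem.Int.mod square 8 + e.2)) := by
    simp only [pvKingOffsets, List.pairwise_cons, List.forall_mem_cons, List.not_mem_nil,
      List.Pairwise.nil, and_true]
    norm_num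
    omega
  unfold pvGen
  rw [List.pairwise_map]
  refine List.Pairwise.imp_of_mem ?_ (List.Pairwise.filter _ h)
  intro a b ha hb hr
  simp only [List.mem_filter, decide_eq_true_eq] at ha hb
  exact hr ⟨ha.2.2.2.1, ha.2.2.2.2⟩ ⟨hb.2.2.2.1, hb.2.2.2.2⟩

theorem pvGen_pairwise_knight (square : Int) : (pvGen pvKnightOffsets square).Pairwise (· < ·) := by
  have hf₀ := PySem.Int.mod_nonneg square (b := 8) (by norm_num)
  have hf₁ := PySem.Int.mod_lt square (b := 8) (by norm_num)
  have h : pvKnightOffsets.Pairwise (fun d e =>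
      (0 ≤ PySem.Int.mod square 8 + d.2 ∧ PySem.Int.mod square 8 + d.2 < 8) →
      (0 ≤ PySem.Int.mod square 8 + e.2 ∧ PySem.Int.mod square 8 + e.2 < 8) →
      (PySem.Int.floordiv square 8 + d.1) * 8 + (PySem.Int.mod square 8 + d.2) <
      (PySem.Int.floordiv square 8 + e.1) * 8 + (PySem.Int.mod square 8 + e.2)) := by
    simp only [pvKnightOffsets, List.pairwise_cons, List.forall_mem_cons, List.not_mem_nil,
      List.Pairwise.nil, and_true]
    norm_num
    omega
  unfold pvGen
  rw [List.pairwise_map]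
  refine List.Pairwise.imp_of_mem ?_ (List.Pairwise.filter _ h)
  intro a b ha hb hr
  simp only [List.mem_filter, decide_eq_true_eq] at ha hb
  exact hr ⟨ha.2.2.2.1, ha.2.2.2.2⟩ ⟨hb.2.2.2.1, hb.2.2.2.2⟩

theorem king_attacks_eq (square : Int) : king_attacks square = pvGen pvKingOffsets square := by
  simp only [king_attacks]
  rw [pvGen_foldl]
  exact PySem.List.sorted_eq_self_of_pairwise _ _
    ((pvGen_pairwise_king square).imp (fun h => le_of_lt h))

theorem knight_attacks_eq (square : Int) : knight_attacks square = pvGen pvKnightOffsets square := by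
  simp only [knight_attacks]
  rw [pvGen_foldl]
  exact PySem.List.sorted_eq_self_of_pairwise _ _
    ((pvGen_pairwise_knight square).imp (fun h => le_of_lt h))

-- a list already in strictly "before"-descending-free order is a fixed point of the insertion loop
theorem pvFoldl_insertBy_eq (before : (Int × Int) → (Int × Int) → Bool) :
    ∀ (ms acc : List (Int × Int)), (∀ x ∈ ms, ∀ y ∈ acc, before x y = false) →
      ms.Pairwise (fun a b => before b a = false) →
      ms.foldl (fun acc x => PySem.List.insertBy before x acc) acc = acc ++ ms := by
  intro ms
  induction ms with
  | nil => intro acc _ _; simp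
  | cons m ms ih =>
    intro acc hacc hpw
    rw [List.pairwise_cons] at hpw
    simp only [List.foldl_cons]
    rw [PySem.List.insertBy_of_forall_not_before _ _ _
      (fun y hy => hacc m (List.mem_cons_self) y hy)]
    rw [ih (acc ++ [m]) ?_ hpw.2]
    · simp
    · intro x hx y hy
      rcases List.mem_append.mp hy with hy | hy
      · exact hacc x (List.mem_cons_of_mem _ hx) y hy
      · rw [List.mem_singleton.mp hy]; exact hpw.1 x hx

theorem pvSorted2_eq_self (ms : List (Int × Int))
    (h : ms.Pairwise (fun a b => a.1 = b.1 ∧ a.2 < b.2)) :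
    PySem.List.sorted2 ms (fun m => m.1) (fun m => m.2) false = ms := by
  show ms.foldl (fun acc x => PySem.List.insertBy _ x acc) [] = ms
  rw [pvFoldl_insertBy_eq _ ms [] (by simp) ?_]
  · simp
  · refine h.imp ?_
    intro a b hab
    simp [hab.1, not_lt_of_gt hab.2]

-- membership in A's accumulated white-attack set
theorem pvMem_foldl_union (wns : List Int) (x : Int) :
    ∀ s0 : PySem.Set Int,
      (x ∈ wns.foldl (fun s sq => PySem.Set.union s (PySem.Set.ofList (knight_attacks sq))) s0 ↔
        x ∈ s0 ∨ ∃ sq ∈ wns, x ∈ knight_attacks sq) := by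
  induction wns with
  | nil => intro s0; simp
  | cons w wns ih =>
    intro s0
    simp only [List.foldl_cons, ih, PySem.Set.mem_union, PySem.Set.mem_ofList, List.mem_cons]
    constructor
    · rintro ((h | h) | ⟨sq, hsq, h⟩)
      · exact Or.inl h
      · exact Or.inr ⟨w, Or.inl rfl, h⟩
      · exact Or.inr ⟨sq, Or.inr hsq, h⟩
    · rintro (h | ⟨sq, (rfl | hsq), h⟩)
      · exact Or.inl (Or.inl h)
      · exact Or.inl (Or.inr h)
      · exact Or.inr ⟨sq, hsq, h⟩

-- delta characterisation of membership in an offset-generated attack list, for on-board dest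
theorem pvMem_gen_iff (offs : List (Int × Int)) (s dest : Int)
    (h0 : 0 ≤ dest) (h1 : dest < 64) :
    dest ∈ pvGen offs s ↔
      (PySem.Int.floordiv dest 8 - PySem.Int.floordiv s 8,
       PySem.Int.mod dest 8 - PySem.Int.mod s 8) ∈ offs := by
  have hds := PySem.Int.floordiv_mul_add_mod dest 8
  have hdm₀ := PySem.Int.mod_nonneg dest (b := 8) (by norm_num)
  have hdm₁ := PySem.Int.mod_lt dest (b := 8) (by norm_num)
  have hss := PySem.Int.floordiv_mul_add_mod s 8
  have hsm₀ := PySem.Int.mod_nonneg s (b := 8) (by norm_num)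
  have hsm₁ := PySem.Int.mod_lt s (b := 8) (by norm_num)
  simp only [pvGen, List.mem_map, List.mem_filter, decide_eq_true_eq]
  constructor
  · rintro ⟨d, ⟨hd, hc⟩, hv⟩
    have h₁ : PySem.Int.floordiv dest 8 = PySem.Int.floordiv s 8 + d.1 := by omega
    have h₂ : PySem.Int.mod dest 8 = PySem.Int.mod s 8 + d.2 := by omega
    have : (PySem.Int.floordiv dest 8 - PySem.Int.floordiv s 8,
            PySem.Int.mod dest 8 - PySem.Int.mod s 8) = d := by
      rw [Prod.ext_iff]; constructor <;> simp <;> omega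
    rw [this]; exact hd
  · intro hd
    refine ⟨_, ⟨hd, ?_⟩, ?_⟩ <;> simp <;> omega

-- the two attack tests agree on every on-board destination
theorem pvAttacked_iff (wk_sq dest : Int) (wn_squares : List Int)
    (h0 : 0 ≤ dest) (h1 : dest < 64) :
    pvAttacked dest wk_sq wn_squares = true ↔
      (dest ∈ (wn_squares.foldl
          (fun s sq => PySem.Set.union s (PySem.Set.ofList (knight_attacks sq)))
          (PySem.Set.union (PySem.Set.ofList (king_attacks wk_sq)) [wk_sq]))) := by
  rw [pvMem_foldl_union, PySem.Set.mem_union, PySem.Set.mem_ofList]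
  simp only [pvAttacked, king_attacks_eq]
  constructor
  · intro h
    split_ifs at h with h₁ h₂
    · exact Or.inl (Or.inr (by simpa using h₁))
    · exact Or.inl (Or.inl ((pvMem_gen_iff _ _ _ h0 h1).mpr (by simpa using h₂)))
    · simp only [List.any_eq_true] at h
      obtain ⟨sq, hsq, hc⟩ := h
      exact Or.inr ⟨sq, hsq, by
        rw [knight_attacks_eq, pvMem_gen_iff _ _ _ h0 h1]; simpa using hc⟩
  · intro h
    split_ifs with h₁ h₂
    · rfl
    · rfl
    · rcases h with (h | h) | ⟨sq, hsq, h⟩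
      · exact absurd (by simpa using (pvMem_gen_iff _ _ _ h0 h1).mp h) h₂
      · exact absurd (beq_iff_eq.mpr (by simpa using h)) (by simpa using h₁)
      · rw [knight_attacks_eq, pvMem_gen_iff _ _ _ h0 h1] at h
        simp only [List.any_eq_true]
        exact ⟨sq, hsq, by simpa using h⟩

-- ===== VERDICT (by name: the statement is the Claim_ definition above) =====
theorem legal_moves_black_spec : Claim_equal_legal_moves_black := by
  intro wk_sq bk_sq wn_squares _
  unfold Spec_legal_moves_black
  simp only [legal_moves_black, legal_moves_black_alt]
  rw [king_attacks_eq bk_sq]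
  rw [PySem.List.foldl_append_ite
    (p := fun dest => ¬ (PySem.Set.contains (wn_squares.foldl
          (fun s sq => PySem.Set.union s (PySem.Set.ofList (knight_attacks sq)))
          (PySem.Set.union (PySem.Set.ofList (king_attacks wk_sq)) [wk_sq])) dest = true))
    (f := fun dest => (bk_sq, dest))]
  rw [PySem.List.foldl_append_ite
    (p := fun d : Int × Int =>
      0 ≤ PySem.Int.floordiv bk_sq 8 + d.1 ∧ PySem.Int.floordiv bk_sq 8 + d.1 < 8 ∧
      0 ≤ PySem.Int.mod bk_sq 8 + d.2 ∧ PySem.Int.mod bk_sq 8 + d.2 < 8 ∧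
      ¬ (pvAttacked ((PySem.Int.floordiv bk_sq 8 + d.1) * 8 + (PySem.Int.mod bk_sq 8 + d.2))
          wk_sq wn_squares = true))
    (f := fun d : Int × Int =>
      (bk_sq, (PySem.Int.floordiv bk_sq 8 + d.1) * 8 + (PySem.Int.mod bk_sq 8 + d.2)))]
  simp only [List.nil_append]
  rw [pvSorted2_eq_self]
  · unfold pvGen
    rw [List.filter_map, List.filter_filter, List.map_map]
    apply congrArg
    apply List.filter_congr
    intro d _
    have hm₀ := PySem.Int.mod_nonneg bk_sq (b := 8) (by norm_num)
    have hm₁ := PySem.Int.mod_lt bk_sq (b := 8) (by norm_num)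
    simp only [Function.comp, ← Bool.decide_and]
    rw [decide_eq_decide]
    constructor
    · rintro ⟨hnc, h1, h2, h3, h4⟩
      refine ⟨h1, h2, h3, h4, ?_⟩
      intro ha
      have h0 : 0 ≤ (PySem.Int.floordiv bk_sq 8 + d.1) * 8 + (PySem.Int.mod bk_sq 8 + d.2) := by omega
      have h64 : (PySem.Int.floordiv bk_sq 8 + d.1) * 8 + (PySem.Int.mod bk_sq 8 + d.2) < 64 := by omega
      have hiff := pvAttacked_iff wk_sq _ wn_squares h0 h64
      rw [← PySem.Set.contains_iff] at hiff
      exact hnc (hiff.mp ha)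
    · rintro ⟨h1, h2, h3, h4, hna⟩
      have h0 : 0 ≤ (PySem.Int.floordiv bk_sq 8 + d.1) * 8 + (PySem.Int.mod bk_sq 8 + d.2) := by omega
      have h64 : (PySem.Int.floordiv bk_sq 8 + d.1) * 8 + (PySem.Int.mod bk_sq 8 + d.2) < 64 := by omega
      have hiff := pvAttacked_iff wk_sq _ wn_squares h0 h64
      rw [← PySem.Set.contains_iff] at hiff
      exact ⟨fun hc => hna (hiff.mpr hc), h1, h2, h3, h4⟩
  · exact List.Pairwise.map _ (fun a b hab => ⟨rfl, hab⟩)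
      ((pvGen_pairwise_king bk_sq).filter _)
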